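-- pv_equiv track=rewrite | github.com/tediverse/tacos | app/services/docs_ingester.py | map_chunks_to_sections
-- ===== SOURCE A (Python) =====
-- def map_chunks_to_sections(content: str, chunks: list[str], sections):
--     """Attach nearest heading info to each chunk using character offsets."""
--
--     chunk_sections = {}
--     chunk_heading_paths = {}
--
--     for i, chunk in enumerate(chunks):
--         snippet = chunk[:50]
--         pos = content.find(snippet)
--         if pos == -1:
--             pos = 0
--
--         stack = []
--         for level, heading, start in sections:
--             if start <= pos:
--                 while stack and stack[-1][0] >= level:
--                     stack.pop()
--                 stack.append((level, heading))
--             else: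
--                 break
--
--         chunk_sections[i] = stack[-1][1] if stack else None
--         chunk_heading_paths[i] = [h for _, h in stack]
--
--     return chunk_sections, chunk_heading_paths
-- ===== SOURCE B (Python) =====
-- def map_chunks_to_sections(content: str, chunks: list[str], sections):
--     """Attach nearest heading info to each chunk using character offsets.
--
--     One preprocessing pass over sections records, for every prefix length k,
--     the heading stack after the first k sections (snaps) and the running
--     maximum of the start offsets (runmax, which is nondecreasing).  A chunk
--     whose position is pos uses exactly the longest prefix of sections whose
--     starts are all <= pos, i.e. the first index where runmax exceeds pos —
--     found by binary search instead of replaying the stack machine per chunk.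
--     """
--     snaps = [[]]          # snaps[k] = heading stack after the first k sections
--     runmax = []           # runmax[k] = max(start of sections[0..k])
--     stack = []
--     for level, heading, start in sections:
--         while stack and stack[-1][0] >= level:
--             stack.pop()
--         stack.append((level, heading))
--         snaps.append(stack.copy())
--         runmax.append(start if not runmax else max(runmax[-1], start))
--
--     chunk_sections = {}
--     chunk_heading_paths = {}
--     for i, chunk in enumerate(chunks):
--         pos = content.find(chunk[:50])
--         if pos == -1:
--             pos = 0
--         # first index with runmax[idx] > pos (binary search; runmax is sorted)
--         lo, hi = 0, len(runmax)
--         while lo < hi: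
--             mid = (lo + hi) // 2
--             if runmax[mid] <= pos:
--                 lo = mid + 1
--             else:
--                 hi = mid
--         st = snaps[lo]
--         chunk_sections[i] = st[-1][1] if st else None
--         chunk_heading_paths[i] = [h for _, h in st]
--
--     return chunk_sections, chunk_heading_paths
-- ===== Notes on version B (the rewrite author's own statement) =====
-- stated objective: faster
-- what changed: B precomputes per-prefix heading-stack snapshots and a running maximum of section starts in one pass over sections, then binary-searches each chunk's position into that monotone array instead of replaying the stack machine over the sections for every chunk.
import Mathlib
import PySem

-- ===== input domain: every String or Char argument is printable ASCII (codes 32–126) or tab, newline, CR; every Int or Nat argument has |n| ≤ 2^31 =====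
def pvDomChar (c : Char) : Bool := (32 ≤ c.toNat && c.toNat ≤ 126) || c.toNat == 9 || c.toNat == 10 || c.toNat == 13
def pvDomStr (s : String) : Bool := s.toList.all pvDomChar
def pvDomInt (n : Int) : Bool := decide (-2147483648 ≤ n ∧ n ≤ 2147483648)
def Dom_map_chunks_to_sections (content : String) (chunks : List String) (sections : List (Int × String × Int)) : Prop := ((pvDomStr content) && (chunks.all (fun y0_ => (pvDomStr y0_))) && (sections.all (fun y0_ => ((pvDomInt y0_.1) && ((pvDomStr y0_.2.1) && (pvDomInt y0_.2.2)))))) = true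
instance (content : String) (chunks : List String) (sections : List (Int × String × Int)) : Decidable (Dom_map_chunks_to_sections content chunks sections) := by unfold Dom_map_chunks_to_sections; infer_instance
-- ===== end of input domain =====

-- ===== PORT A =====
-- A rebuilds the heading stack from scratch for every chunk; B (below) precomputes
-- per-prefix snapshots once and binary-searches each chunk position (see header of Source B).
-- shared helper: pos = content.find(chunk[:50]); if pos == -1: pos = 0   (identical lines in A and B)
def pvSnippetPos (content : String) (chunk : String) : Int :=
  let snippet := PySem.Str.slice chunk none (some 50)
  let p := PySem.Str.find content snippet
  if p = -1 then 0 else p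

-- shared helper: while stack and stack[-1][0] >= level: stack.pop(); stack.append((level, heading))
-- (identical lines in A and B; the stack is kept top-first, so pop-from-end is dropWhile at the head)
def pvStep (stack : List (Int × String)) (level : Int) (heading : String) : List (Int × String) :=
  (level, heading) :: stack.dropWhile (fun p => decide (level ≤ p.1))

-- A's inner loop over sections (with the early break on start > pos)
def pvLoopA (pos : Int) : List (Int × String × Int) → List (Int × String) → List (Int × String)
  | [], stack => stack
  | (l, h, s) :: rest, stack =>
      if s ≤ pos then pvLoopA pos rest (pvStep stack l h) else stack

def map_chunks_to_sections (content : String) (chunks : List String) (sections : List (Int × String × Int)) : (List (Int × Option String)) × (List (Int × List String)) :=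
  let res := (PySem.List.enumerate chunks 0).foldl
    (fun (acc : PySem.Dict Int (Option String) × PySem.Dict Int (List String)) ic =>
      let pos := pvSnippetPos content ic.2
      let stack := pvLoopA pos sections []
      (acc.1.insert ic.1 (stack.head?.map (·.2)),
       acc.2.insert ic.1 ((stack.map (·.2)).reverse)))
    (PySem.Dict.empty, PySem.Dict.empty)
  (res.1.items, res.2.items)

-- ===== PORT B =====
-- one pass over sections: heading-stack snapshot after each prefix, and the running max of starts
def pvBuildB (stack : List (Int × String)) (cur : Option Int) :
    List (Int × String × Int) → List (List (Int × String)) × List Int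
  | [] => ([], [])
  | (l, h, s) :: rest =>
      let st := pvStep stack l h
      let c := match cur with | none => s | some c => max c s
      let r := pvBuildB st (some c) rest
      (st :: r.1, c :: r.2)

-- hand-written binary search from Source B: first index in [lo, hi) with m[idx] > pos, else hi
def pvBSearch (m : List Int) (pos : Int) (lo hi : Nat) : Nat :=
  if lo < hi then
    let mid := (lo + hi) / 2
    if m.getD mid 0 ≤ pos then pvBSearch m pos (mid + 1) hi else pvBSearch m pos lo mid
  else lo
termination_by hi - lo
decreasing_by all_goals omega

def map_chunks_to_sections_alt (content : String) (chunks : List String) (sections : List (Int × String × Int)) : (List (Int × Option String)) × (List (Int × List String)) :=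
  let pre := pvBuildB [] none sections
  let snaps := [] :: pre.1
  let runmax := pre.2
  let res := (PySem.List.enumerate chunks 0).foldl
    (fun (acc : PySem.Dict Int (Option String) × PySem.Dict Int (List String)) ic =>
      let pos := pvSnippetPos content ic.2
      let st := snaps.getD (pvBSearch runmax pos 0 runmax.length) []
      (acc.1.insert ic.1 (st.head?.map (·.2)),
       acc.2.insert ic.1 ((st.map (·.2)).reverse)))
    (PySem.Dict.empty, PySem.Dict.empty)
  (res.1.items, res.2.items)

-- ===== PRECONDITION & SPEC =====
def Spec_map_chunks_to_sections (content : String) (chunks : List String) (sections : List (Int × String × Int)) (out : (List (Int × Option String)) × (List (Int × List String))) : Prop := out = map_chunks_to_sections_alt content chunks sections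
instance (content : String) (chunks : List String) (sections : List (Int × String × Int)) (out : (List (Int × Option String)) × (List (Int × List String))) : Decidable (Spec_map_chunks_to_sections content chunks sections out) := by unfold Spec_map_chunks_to_sections; infer_instance

-- ===== CLAIM (what is proved, stated in full; the proofs are below) =====
def Claim_equal_map_chunks_to_sections : Prop := ∀ (content : String) (chunks : List String) (sections : List (Int × String × Int)), Dom_map_chunks_to_sections content chunks sections → Spec_map_chunks_to_sections content chunks sections (map_chunks_to_sections content chunks sections)

-- ===== LEMMAS AND PROOFS =====

-- k = number of sections A's inner loop actually processes (longest start<=pos prefix)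
def pvK (pos : Int) : List (Int × String × Int) → Nat
  | [] => 0
  | (_, _, s) :: rest => if s ≤ pos then pvK pos rest + 1 else 0

def pvFold (stack : List (Int × String)) (l : List (Int × String × Int)) : List (Int × String) :=
  l.foldl (fun st t => pvStep st t.1 t.2.1) stack

-- spec-side running max
def pvRmx (cur : Option Int) : List Int → List Int
  | [] => []
  | x :: rest =>
      let c := match cur with | none => x | some c => max c x
      c :: pvRmx (some c) rest

theorem pvK_le (pos : Int) (sects : List (Int × String × Int)) : pvK pos sects ≤ sects.length := by
  induction sects with
  | nil => simp [pvK]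
  | cons hd tl ih =>
      obtain ⟨l, h, st⟩ := hd
      simp only [pvK, List.length_cons]
      split <;> omega

theorem pvK_lt_imp (pos : Int) (sects : List (Int × String × Int)) (i : Nat)
    (h : i < pvK pos sects) : (sects.map (fun t => t.2.2)).getD i 0 ≤ pos := by
  induction sects generalizing i with
  | nil => simp [pvK] at h
  | cons hd tl ih =>
      obtain ⟨l, hh, st⟩ := hd
      simp only [pvK] at h
      by_cases hs : st ≤ pos
      · simp only [hs, if_true] at h
        cases i with
        | zero => simpa using hs
        | succ j => simp only [List.map_cons, List.getD_cons_succ]; exact ih j (by omega)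
      · simp [hs] at h

theorem pvK_stop (pos : Int) (sects : List (Int × String × Int))
    (h : pvK pos sects < sects.length) :
    ¬ (sects.map (fun t => t.2.2)).getD (pvK pos sects) 0 ≤ pos := by
  induction sects with
  | nil => simp at h
  | cons hd tl ih =>
      obtain ⟨l, hh, st⟩ := hd
      by_cases hs : st ≤ pos
      · simp only [pvK, hs, if_true] at h ⊢
        simpa using ih (by simpa using h)
      · simp [pvK, hs]

theorem pvLoopA_eq_fold (pos : Int) (sects : List (Int × String × Int)) (stack : List (Int × String)) :
    pvLoopA pos sects stack = pvFold stack (sects.take (pvK pos sects)) := by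
  induction sects generalizing stack with
  | nil => simp [pvLoopA, pvK, pvFold]
  | cons hd tl ih =>
      obtain ⟨l, hh, st⟩ := hd
      by_cases hs : st ≤ pos
      · simp [pvLoopA, pvK, hs, pvFold] at ih ⊢
        exact ih (pvStep stack l hh)
      · simp [pvLoopA, pvK, hs, pvFold]

theorem pvBuildB_snd (stack : List (Int × String)) (cur : Option Int) (sects : List (Int × String × Int)) :
    (pvBuildB stack cur sects).2 = pvRmx cur (sects.map (fun t => t.2.2)) := by
  induction sects generalizing stack cur with
  | nil => simp [pvBuildB, pvRmx]
  | cons hd tl ih =>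
      obtain ⟨l, hh, st⟩ := hd
      simp [pvBuildB, pvRmx, ih]

theorem pvRmx_length (cur : Option Int) (xs : List Int) : (pvRmx cur xs).length = xs.length := by
  induction xs generalizing cur with
  | nil => simp [pvRmx]
  | cons x rest ih => simp [pvRmx, ih]

theorem pvRmx_getD_le_iff (pos : Int) (xs : List Int) (cur : Option Int) (j : Nat) (hj : j < xs.length) :
    ((pvRmx cur xs).getD j 0 ≤ pos ↔ (∀ c ∈ cur, c ≤ pos) ∧ ∀ i ≤ j, xs.getD i 0 ≤ pos) := by
  induction xs generalizing cur j with
  | nil => simp at hj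
  | cons x rest ih =>
      cases j with
      | zero =>
          cases cur with
          | none => simp [pvRmx]
          | some c =>
              simp only [pvRmx, List.getD_cons_zero, max_le_iff, Option.mem_def,
                Option.some.injEq, forall_eq']
              constructor
              · rintro ⟨h1, h2⟩
                exact ⟨h1, fun i hi => by interval_cases i; simpa using h2⟩
              · rintro ⟨h1, h2⟩
                exact ⟨h1, by simpa using h2 0 (le_refl 0)⟩
      | succ j' =>
          have hj' : j' < rest.length := by simpa using hj
          cases cur with
          | none =>
              simp only [pvRmx, List.getD_cons_succ]
              rw [ih (some x) j' hj']
              constructor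
              · rintro ⟨h1, h2⟩
                refine ⟨(fun c hc => by cases hc), fun i hi => ?_⟩
                cases i with
                | zero => simpa using h1 x rfl
                | succ i' => simpa using h2 i' (by omega)
              · rintro ⟨_, h2⟩
                refine ⟨(fun c hc => by cases hc; simpa using h2 0 (by omega)), fun i hi => ?_⟩
                simpa using h2 (i + 1) (by omega)
          | some c =>
              simp only [pvRmx, List.getD_cons_succ]
              rw [ih (some (max c x)) j' hj']
              constructor
              · rintro ⟨h1, h2⟩
                have hm := h1 (max c x) rfl
                refine ⟨(fun d hd => by cases hd; exact le_trans (le_max_left _ _) hm), fun i hi => ?_⟩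
                cases i with
                | zero => simpa using le_trans (le_max_right _ _) hm
                | succ i' => simpa using h2 i' (by omega)
              · rintro ⟨h1, h2⟩
                refine ⟨(fun d hd => by
                  cases hd
                  exact max_le (h1 c rfl) (by simpa using h2 0 (by omega))), fun i hi => ?_⟩
                simpa using h2 (i + 1) (by omega)

theorem pvBuildB_fst_getD (stack : List (Int × String)) (cur : Option Int)
    (sects : List (Int × String × Int)) (j : Nat) (hj : j < sects.length) :
    (pvBuildB stack cur sects).1.getD j [] = pvFold stack (sects.take (j + 1)) := by
  induction sects generalizing stack cur j with
  | nil => simp at hj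
  | cons hd tl ih =>
      obtain ⟨l, hh, st⟩ := hd
      cases j with
      | zero => simp [pvBuildB, pvFold]
      | succ j' =>
          have hj' : j' < tl.length := by simpa using hj
          simp only [pvBuildB, List.getD_cons_succ, List.take_succ_cons]
          rw [ih _ _ _ hj']
          simp [pvFold]

theorem pvBSearch_eq (pos : Int) (sects : List (Int × String × Int)) (lo hi : Nat)
    (hlo : lo ≤ pvK pos sects) (hhi : pvK pos sects ≤ hi)
    (hlen : hi ≤ (sects.map (fun t => t.2.2)).length) :
    pvBSearch (pvRmx none (sects.map (fun t => t.2.2))) pos lo hi = pvK pos sects := by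
  have main : ∀ (fuel lo hi : Nat), hi - lo ≤ fuel → lo ≤ pvK pos sects → pvK pos sects ≤ hi →
      hi ≤ (sects.map (fun t => t.2.2)).length →
      pvBSearch (pvRmx none (sects.map (fun t => t.2.2))) pos lo hi = pvK pos sects := by
    intro fuel
    induction fuel with
    | zero =>
        intro lo hi hf h1 h2 _
        rw [pvBSearch]
        have : ¬ lo < hi := by omega
        simp [this]
        omega
    | succ f ih =>
        intro lo hi hf h1 h2 h3
        by_cases hlt : lo < hi
        · have hmidlt : (lo + hi) / 2 < hi := by omega
          have hmidge : lo ≤ (lo + hi) / 2 := by omega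
          have hmlen : (lo + hi) / 2 < (sects.map (fun t => t.2.2)).length := by omega
          have hstep : pvBSearch (pvRmx none (sects.map (fun t => t.2.2))) pos lo hi =
              if (pvRmx none (sects.map (fun t => t.2.2))).getD ((lo + hi) / 2) 0 ≤ pos then
                pvBSearch (pvRmx none (sects.map (fun t => t.2.2))) pos ((lo + hi) / 2 + 1) hi
              else pvBSearch (pvRmx none (sects.map (fun t => t.2.2))) pos lo ((lo + hi) / 2) := by
            rw [pvBSearch]; simp [hlt]
          rw [hstep]
          by_cases hc : (pvRmx none (sects.map (fun t => t.2.2))).getD ((lo + hi) / 2) 0 ≤ pos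
          · have hall := (pvRmx_getD_le_iff pos (sects.map (fun t => t.2.2)) none ((lo + hi) / 2) hmlen).mp hc
            have hkgt : (lo + hi) / 2 < pvK pos sects := by
              by_contra hle
              have hklt : pvK pos sects < sects.length := by
                have : (sects.map (fun t => t.2.2)).length = sects.length := by simp
                omega
              exact pvK_stop pos sects hklt (hall.2 (pvK pos sects) (by omega))
            rw [if_pos hc]
            exact ih ((lo + hi) / 2 + 1) hi (by omega) (by omega) h2 h3
          · have hex : ∃ i ≤ (lo + hi) / 2, ¬ (sects.map (fun t => t.2.2)).getD i 0 ≤ pos := by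
              by_contra hno
              push Not at hno
              exact hc ((pvRmx_getD_le_iff pos (sects.map (fun t => t.2.2)) none ((lo + hi) / 2) hmlen).mpr
                ⟨by simp, fun i hi' => hno i hi'⟩)
            obtain ⟨i, hile, hibad⟩ := hex
            have hki : pvK pos sects ≤ i := by
              by_contra hlt2
              exact hibad (pvK_lt_imp pos sects i (by omega))
            rw [if_neg hc]
            exact ih lo ((lo + hi) / 2) (by omega) h1 (by omega) (by omega)
        · rw [pvBSearch]
          simp [hlt]
          omega
  exact main (hi - lo) lo hi (le_refl _) hlo hhi hlen

-- the per-chunk equality: A's replayed stack = B's snapshot lookup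
theorem pvChunk_eq (pos : Int) (sects : List (Int × String × Int)) :
    pvLoopA pos sects [] =
      ([] :: (pvBuildB [] none sects).1).getD
        (pvBSearch (pvBuildB [] none sects).2 pos 0 (pvBuildB [] none sects).2.length) [] := by
  rw [pvBuildB_snd]
  have hlen : (pvRmx none (sects.map fun t => t.2.2)).length = sects.length := by
    rw [pvRmx_length]; simp
  rw [hlen]
  rw [pvBSearch_eq pos sects 0 sects.length (Nat.zero_le _) (pvK_le pos sects) (by simp)]
  rw [pvLoopA_eq_fold]
  cases hk : pvK pos sects with
  | zero => simp [pvFold]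
  | succ j =>
      have hj : j < sects.length := by
        have := pvK_le pos sects
        omega
      simp only [List.getD_cons_succ]
      rw [pvBuildB_fst_getD _ _ _ _ hj]

-- ===== VERDICT (by name: the statement is the Claim_ definition above) =====
theorem pvFoldl_congr {α β : Type} (f g : β → α → β) (l : List α) (b : β)
    (h : ∀ b a, f b a = g b a) : l.foldl f b = l.foldl g b := by
  induction l generalizing b with
  | nil => rfl
  | cons x xs ih => simp only [List.foldl_cons]; rw [h]; exact ih _

theorem map_chunks_to_sections_spec : Claim_equal_map_chunks_to_sections := by
  intro content chunks sections _
  unfold Spec_map_chunks_to_sections map_chunks_to_sections map_chunks_to_sections_alt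
  simp only []
  refine congrArg
      (fun r : PySem.Dict Int (Option String) × PySem.Dict Int (List String) => (r.1.items, r.2.items))
      (pvFoldl_congr _ _ _ _ ?_)
  intro acc ic
  rw [pvChunk_eq]
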